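-- pv_equiv track=rewrite | github.com/matheuswemmer/2-semester | Tópicos Avançados 1/Aula 3/contadorDeConsoantes/consoantes.py | contarConsoantes
-- ===== SOURCE A (Python) =====
-- def contarConsoantes(palavra):
--     contador = 0
--     vogais = ["A", "E", "I", "O","U"]
--     maiusculas = palavra.upper()
--     for i in maiusculas:
--         if i not in vogais:
--            contador += 1
--     return contador
-- ===== SOURCE B (Python) =====
-- def contarConsoantes(palavra):
--     contagem = {}
--     for c in palavra.upper():
--         contagem[c] = contagem.get(c, 0) + 1
--     total = 0
--     for letra, vezes in contagem.items():
--         if letra not in "AEIOU":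
--             total += vezes
--     return total
-- ===== Notes on version B (the rewrite author's own statement) =====
-- stated objective: alternative
-- what changed: B first aggregates the uppercased string into a character-frequency dictionary, then sums the counts of the distinct non-vowel keys, so the vowel membership test runs once per distinct character instead of once per character as in A's direct test-and-increment loop.
import Mathlib
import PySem

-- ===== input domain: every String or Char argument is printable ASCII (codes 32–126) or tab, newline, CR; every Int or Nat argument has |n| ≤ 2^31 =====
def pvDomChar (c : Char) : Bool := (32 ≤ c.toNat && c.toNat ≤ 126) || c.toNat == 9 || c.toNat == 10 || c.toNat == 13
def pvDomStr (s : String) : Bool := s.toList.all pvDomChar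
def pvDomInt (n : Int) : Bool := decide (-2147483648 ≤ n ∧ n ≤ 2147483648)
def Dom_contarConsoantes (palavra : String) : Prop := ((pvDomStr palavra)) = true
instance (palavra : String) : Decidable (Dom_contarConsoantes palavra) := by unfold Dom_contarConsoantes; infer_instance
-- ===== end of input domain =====

-- B aggregates a character-frequency dictionary first and then sums the counts of the
-- distinct non-vowel keys, instead of A's per-character test-and-increment loop; objective: alternative.

-- ===== PORT A =====
def contarConsoantes (palavra : String) : Int :=
  let vogais : List Char := ['A', 'E', 'I', 'O', 'U']
  let maiusculas := PySem.Str.upper palavra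
  maiusculas.toList.foldl
    (fun contador i => if !(vogais.contains i) then contador + 1 else contador) 0

-- ===== PORT B =====
def contarConsoantes_alt (palavra : String) : Int :=
  let contagem : PySem.Dict Char Int :=
    (PySem.Str.upper palavra).toList.foldl
      (fun d c => d.insert c (d.getD c 0 + 1)) PySem.Dict.empty
  contagem.items.foldl
    (fun total p =>
      if !(PySem.Str.isIn (String.singleton p.1) "AEIOU") then total + p.2 else total) 0

-- ===== PRECONDITION & SPEC =====
def Spec_contarConsoantes (palavra : String) (out : Int) : Prop := out = contarConsoantes_alt palavra
instance (palavra : String) (out : Int) : Decidable (Spec_contarConsoantes palavra out) := by unfold Spec_contarConsoantes; infer_instance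

-- ===== CLAIM (what is proved, stated in full; the proofs are below) =====
def Claim_equal_contarConsoantes : Prop := ∀ (palavra : String), Dom_contarConsoantes palavra → Spec_contarConsoantes palavra (contarConsoantes palavra)

-- ===== LEMMAS AND PROOFS =====

-- 'ch in "AEIOU"' (substring test on a single char) is just membership of the char.
lemma isIn_singleton_vowels (ch : Char) :
    PySem.Str.isIn (String.singleton ch) "AEIOU"
      = (['A', 'E', 'I', 'O', 'U'] : List Char).contains ch := by
  have hA : "AEIOU".toList = ['A', 'E', 'I', 'O', 'U'] := rfl
  have h : (String.singleton ch).toList = [ch] := by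
    simp [String.singleton]
  simp only [PySem.Str.isIn_eq, h, hA]
  by_cases hm : ch ∈ (['A', 'E', 'I', 'O', 'U'] : List Char)
  · rw [(PySem.Chars.isIn_iff_infix _ _).mpr ?_]
    · simp [hm]
    · obtain ⟨l₁, l₂, heq⟩ := List.append_of_mem hm
      rw [heq]; exact ⟨l₁, l₂, by simp⟩
  · rw [(PySem.Chars.isIn_eq_false_iff _ _).mpr ?_]
    · simp [hm]
    · intro hinf
      exact hm (hinf.mem (by simp))

-- B's second loop (guarded accumulation over pairs) is the sum of the selected values.
lemma foldl_if_add_snd (q : Char × Int → Bool) (l : List (Char × Int)) (acc : Int) :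
    l.foldl (fun total p => if q p then total + p.2 else total) acc
      = acc + ((l.filter q).map (·.2)).sum := by
  induction l generalizing acc with
  | nil => simp
  | cons x t ih =>
    by_cases h : q x <;> simp [h, ih]
    ring

-- the indicator of x summed over a Nodup list: 1 if x is in it, else 0
lemma sum_indicator_nodup (x : Char) (ks : List Char) (hnd : ks.Nodup) :
    (ks.map (fun k => if k = x then (1 : Int) else 0)).sum
      = if x ∈ ks then (1 : Int) else 0 := by
  induction ks with
  | nil => simp
  | cons a t ih =>
    rcases List.nodup_cons.mp hnd with ⟨hna, hnt⟩
    by_cases hax : a = x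
    · subst hax
      simp [ih hnt, hna]
    · simp only [List.map_cons, List.sum_cons, if_neg hax, ih hnt, List.mem_cons]
      have : ¬ x = a := fun h => hax h.symm
      simp [this]

-- summing the multiplicities of the distinct covering keys recovers countP
lemma sum_counts (p : Char → Bool) (ks : List Char) (hnd : ks.Nodup)
    (l : List Char) (hcov : ∀ k ∈ l, k ∈ ks) :
    ((ks.filter p).map (fun k => (l.count k : Int))).sum = (l.countP p : Int) := by
  induction l with
  | nil => simp
  | cons x t ih =>
    have hx : x ∈ ks := hcov x (by simp)
    have hcov' : ∀ k ∈ t, k ∈ ks := fun k hk => hcov k (List.mem_cons_of_mem _ hk)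
    have hcount : ∀ k : Char, ((x :: t).count k : Int)
        = (t.count k : Int) + (if k = x then (1 : Int) else 0) := by
      intro k
      by_cases hkx : k = x
      · subst hkx; simp [List.count_cons_self]
      · have : ¬ x = k := fun h => hkx h.symm
        simp [this, hkx]
    have hsplit :
        ((ks.filter p).map (fun k => ((x :: t).count k : Int))).sum
          = ((ks.filter p).map (fun k => (t.count k : Int))).sum
            + ((ks.filter p).map (fun k => if k = x then (1 : Int) else 0)).sum := by
      have : (ks.filter p).map (fun k => ((x :: t).count k : Int))
          = (ks.filter p).map (fun k => (t.count k : Int) + (if k = x then (1 : Int) else 0)) := by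
        exact List.map_congr_left (fun k _ => hcount k)
      rw [this, PySem.List.sum_map_add_int]
    rw [hsplit, ih hcov', sum_indicator_nodup x (ks.filter p) (hnd.filter p)]
    by_cases hp : p x
    · have hmem : x ∈ ks.filter p := List.mem_filter.mpr ⟨hx, hp⟩
      simp [hmem, hp]
    · have hmem : x ∉ ks.filter p := fun h => hp (List.mem_filter.mp h).2
      simp [hmem, hp]

-- ===== VERDICT (by name: the statement is the Claim_ definition above) =====
theorem contarConsoantes_spec : Claim_equal_contarConsoantes := by
  intro palavra _
  show contarConsoantes palavra = contarConsoantes_alt palavra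
  simp only [contarConsoantes, contarConsoantes_alt,
    PySem.Dict.foldl_insert_getD_add_one_eq_counter, PySem.Dict.items_counter,
    foldl_if_add_snd, zero_add, PySem.List.foldl_if_add_one]
  rw [List.filter_map, List.map_map]
  simp only [Function.comp_def, isIn_singleton_vowels]
  exact (sum_counts (fun k => !(['A', 'E', 'I', 'O', 'U'] : List Char).contains k)
    (PySem.Set.ofList ((PySem.Str.upper palavra).toList)) (PySem.Set.nodup_ofList _)
    ((PySem.Str.upper palavra).toList)
    (fun k hk => (PySem.Set.mem_ofList _ _).mpr hk)).symm
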